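-- pv_equiv track=rewrite | github.com/erinakin/PLD_ControlSystem_Python | PLD_ControlSystem_Python/src/pld_controlsystem_python/motion_panel.py | extract_stage_names
-- ===== SOURCE A (Python) =====
-- def extract_stage_names(status_message):
--     """
--     Extract the stage names from the status message.
--
--     Args:
--     status_message (str): The status message.
--
--     Returns:
--     list: The list of stage names.
--     """
--     stages = []
--
--     # Find the part of the message with the stages
--     if "Stages:" in status_message and "Hardware Status:" in status_message:
--         stages_part = status_message.split("Stages:")[1].split("Hardware Status:")[0].strip()
--         # Split by spaces and remove the part in parentheses
--         for stage_info in stages_part.split():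
--             stage_name = stage_info.split('(')[0]
--             if stage_name:  # Add the stage name if it's not empty
--                 stages.append(stage_name)
--     return stages
-- ===== SOURCE B (Python) =====
-- def extract_stage_names(status_message):
--     """Single-pass character scanner instead of nested split()/split('(') passes."""
--     if "Stages:" not in status_message or "Hardware Status:" not in status_message:
--         return []
--     stages_part = status_message.split("Stages:")[1].split("Hardware Status:")[0].strip()
--     names = []
--     cur = []            # characters of the current stage name
--     skipping = False    # inside the '(...)' tail of the current token
--     for ch in stages_part:
--         if ch.isspace():
--             if cur:
--                 names.append(''.join(cur))
--             cur = []
--             skipping = False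
--         elif ch == '(':
--             skipping = True
--         elif not skipping:
--             cur.append(ch)
--     if cur:
--         names.append(''.join(cur))
--     return names
-- ===== Notes on version B (the rewrite author's own statement) =====
-- stated objective: alternative
-- what changed: The per-token processing is replaced: instead of splitting the stages region into whitespace tokens and re-splitting each token on '(', B scans the region once character by character with a small state machine (current name buffer, in-parenthesis flag).
import Mathlib
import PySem

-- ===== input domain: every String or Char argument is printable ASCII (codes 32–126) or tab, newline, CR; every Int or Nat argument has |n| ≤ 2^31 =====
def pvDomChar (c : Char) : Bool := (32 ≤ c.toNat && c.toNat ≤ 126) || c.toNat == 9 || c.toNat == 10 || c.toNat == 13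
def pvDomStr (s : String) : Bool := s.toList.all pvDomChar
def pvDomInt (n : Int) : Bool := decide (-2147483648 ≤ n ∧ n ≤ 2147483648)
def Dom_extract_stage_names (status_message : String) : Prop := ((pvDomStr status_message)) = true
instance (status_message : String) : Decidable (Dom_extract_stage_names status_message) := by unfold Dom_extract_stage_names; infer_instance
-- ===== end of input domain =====

-- B replaces A's nested split()/split('(') token processing by a single character-level
-- state-machine scan of the stages region; alternative decomposition, same behaviour.

-- ===== PORT A =====
-- literal port of A: guard, split/strip to isolate the stages region, then a loop over
-- the whitespace tokens taking each token's part before '(' and keeping it if nonempty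
def extract_stage_names (status_message : String) : List String :=
  let stages : List String := []
  if PySem.Str.isIn "Stages:" status_message && PySem.Str.isIn "Hardware Status:" status_message then
    let stages_part : List Char :=
      PySem.Chars.strip
        (PySem.List.pyGetD
          (PySem.Chars.splitOn
            (PySem.List.pyGetD (PySem.Chars.splitOn status_message.toList "Stages:".toList) 1 [])
            "Hardware Status:".toList)
          0 [])
    (PySem.Chars.split₀ stages_part).foldl
      (fun acc stage_info =>
        let stage_name := PySem.List.pyGetD (PySem.Chars.splitOn stage_info "(".toList) 0 []
        if !stage_name.isEmpty then acc ++ [String.ofList stage_name] else acc)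
      stages
  else stages

-- ===== PORT B =====
-- B's scanner: names collected so far, current name buffer, in-parenthesis flag
def esnScan : List Char → List String → List Char → Bool → List String
  | [], names, cur, _ =>
      if cur.isEmpty then names else names ++ [String.ofList cur]
  | c :: rest, names, cur, skipping =>
      if PySem.Chars.isspace c then
        esnScan rest (if cur.isEmpty then names else names ++ [String.ofList cur]) [] false
      else if c = '(' then
        esnScan rest names cur true
      else if skipping then
        esnScan rest names cur skipping
      else
        esnScan rest names (cur ++ [c]) skipping

def extract_stage_names_alt (status_message : String) : List String :=
  if !(PySem.Str.isIn "Stages:" status_message) || !(PySem.Str.isIn "Hardware Status:" status_message) then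
    []
  else
    let stages_part : List Char :=
      PySem.Chars.strip
        (PySem.List.pyGetD
          (PySem.Chars.splitOn
            (PySem.List.pyGetD (PySem.Chars.splitOn status_message.toList "Stages:".toList) 1 [])
            "Hardware Status:".toList)
          0 [])
    esnScan stages_part [] [] false

-- ===== PRECONDITION & SPEC =====
def Spec_extract_stage_names (status_message : String) (out : List String) : Prop := out = extract_stage_names_alt status_message
instance (status_message : String) (out : List String) : Decidable (Spec_extract_stage_names status_message out) := by unfold Spec_extract_stage_names; infer_instance

-- ===== CLAIM (what is proved, stated in full; the proofs are below) =====
def Claim_equal_extract_stage_names : Prop := ∀ (status_message : String), Dom_extract_stage_names status_message → Spec_extract_stage_names status_message (extract_stage_names status_message)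

-- ===== LEMMAS AND PROOFS =====

-- "not a '('" — the predicate behind A's token.split('(')[0]
def esnP : Char → Bool := fun c => c ≠ '('

-- accumulator lemma for PySem.Chars.splitOn.go
lemma splitOnGo_acc (sep : List Char) (fuel : Nat) :
    ∀ (l cur : List Char) (acc : List (List Char)),
      PySem.Chars.splitOn.go sep fuel l cur acc
        = acc.reverse ++ PySem.Chars.splitOn.go sep fuel l cur [] := by
  induction fuel with
  | zero => intro l cur acc; simp [PySem.Chars.splitOn.go]
  | succ fuel ih =>
      intro l cur acc
      cases l with
      | nil => simp [PySem.Chars.splitOn.go]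
      | cons c rest =>
          by_cases h : sep.isPrefixOf (c :: rest) = true
          · rw [PySem.Chars.splitOn.go, PySem.Chars.splitOn.go]
            simp only [h, if_true]
            rw [ih _ _ (cur.reverse :: acc), ih _ _ [cur.reverse]]
            simp
          · rw [PySem.Chars.splitOn.go, PySem.Chars.splitOn.go]
            simp only [h, if_false, Bool.false_eq_true]
            exact ih _ _ _

-- first piece of splitOn by "(": the prefix of the input before the first '('
lemma splitOnGo_head (fuel : Nat) :
    ∀ (l cur : List Char), l.length < fuel →
      ∃ tl, PySem.Chars.splitOn.go ['('] fuel l cur []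
        = (cur.reverse ++ l.takeWhile esnP) :: tl := by
  induction fuel with
  | zero => intro l cur h; omega
  | succ fuel ih =>
      intro l cur h
      cases l with
      | nil => exact ⟨[], by simp [PySem.Chars.splitOn.go]⟩
      | cons c rest =>
          by_cases hc : c = '('
          · have hpre : List.isPrefixOf ['('] (c :: rest) = true := by
              simp [List.isPrefixOf, hc]
            rw [PySem.Chars.splitOn.go]
            simp only [hpre, if_true]
            rw [splitOnGo_acc]
            refine ⟨PySem.Chars.splitOn.go ['('] fuel (List.drop ['('].length (c :: rest)) [] [], ?_⟩
            have htw : (c :: rest).takeWhile esnP = [] := by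
              rw [List.takeWhile_cons_of_neg]
              simp [esnP, hc]
            rw [htw]
            simp only [List.reverse_cons, List.reverse_nil, List.nil_append,
              List.append_nil, List.singleton_append]
          · have hpre : List.isPrefixOf ['('] (c :: rest) = false := by
              simp [List.isPrefixOf]
              exact fun h => hc h.symm
            rw [PySem.Chars.splitOn.go]
            simp only [hpre, if_false, Bool.false_eq_true]
            obtain ⟨tl, htl⟩ := ih rest (c :: cur) (by simpa using Nat.lt_of_succ_lt_succ h)
            refine ⟨tl, ?_⟩
            rw [htl]
            have htw : (c :: rest).takeWhile esnP = c :: rest.takeWhile esnP := by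
              rw [List.takeWhile_cons_of_pos]
              simp [esnP, hc]
            simp [htw]

lemma head_splitOn_paren (cs : List Char) :
    PySem.List.pyGetD (PySem.Chars.splitOn cs "(".toList) 0 [] = cs.takeWhile esnP := by
  have hsep : ("(".toList : List Char) = ['('] := rfl
  rw [PySem.Chars.splitOn, hsep]
  obtain ⟨tl, htl⟩ := splitOnGo_head (cs.length + 1) cs [] (by omega)
  rw [htl]
  simp [PySem.List.pyGetD_zero_cons]

-- the step function of port A's token loop (definitionally A's foldl body)
def esnStep (acc : List String) (stage_info : List Char) : List String :=
  if !(PySem.List.pyGetD (PySem.Chars.splitOn stage_info "(".toList) 0 []).isEmpty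
  then acc ++ [String.ofList (PySem.List.pyGetD (PySem.Chars.splitOn stage_info "(".toList) 0 [])]
  else acc

-- flushing B's buffer = A's step on the full raw token
lemma flush_eq (names : List String) (cur : List Char) :
    (if (cur.reverse.takeWhile esnP).isEmpty = true then names
     else names ++ [String.ofList (cur.reverse.takeWhile esnP)]) = esnStep names cur.reverse := by
  unfold esnStep
  rw [head_splitOn_paren]
  generalize cur.reverse.takeWhile esnP = n
  cases n <;> rfl

lemma takeWhile_append_of_bad {p : Char → Bool} {l : List Char} (c : Char)
    (hx : ∃ x ∈ l, p x = false) :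
    (l ++ [c]).takeWhile p = l.takeWhile p := by
  induction l with
  | nil => simp at hx
  | cons a t ih =>
      rcases hx with ⟨x, hx, hpx⟩
      by_cases hpa : p a = true
      · have hxt : x ∈ t := by
          cases hx with
          | head => simp_all
          | tail _ h => exact h
        rw [List.cons_append, List.takeWhile_cons_of_pos hpa,
          List.takeWhile_cons_of_pos hpa, ih ⟨x, hxt, hpx⟩]
      · have hpa' : p a = false := by simpa using hpa
        rw [List.cons_append, List.takeWhile_cons_of_neg (by simp [hpa']),
          List.takeWhile_cons_of_neg (by simp [hpa'])]

lemma takeWhile_append_of_good {p : Char → Bool} {l : List Char} (c : Char)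
    (hx : ∀ x ∈ l, p x = true) :
    (l ++ [c]).takeWhile p = l ++ (if p c then [c] else []) := by
  induction l with
  | nil =>
      cases hpc : p c
      · rw [List.nil_append, List.takeWhile_cons_of_neg (by simp [hpc])]
        simp
      · rw [List.nil_append, List.takeWhile_cons_of_pos hpc]
        simp
  | cons a t ih =>
      have hpa : p a = true := hx a (by simp)
      rw [List.cons_append, List.takeWhile_cons_of_pos hpa,
        ih (fun x hxm => hx x (by simp [hxm])), List.cons_append]

-- accumulator lemma for PySem.Chars.split₀.go
lemma split0Go_acc :
    ∀ (cs cur : List Char) (acc : List (List Char)),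
      PySem.Chars.split₀.go cs cur acc
        = acc.reverse ++ PySem.Chars.split₀.go cs cur [] := by
  intro cs
  induction cs with
  | nil =>
      intro cur acc
      by_cases h : cur.isEmpty = true <;> simp [PySem.Chars.split₀.go, h]
  | cons c rest ih =>
      intro cur acc
      by_cases hs : PySem.Chars.isspace c = true
      · by_cases h : cur.isEmpty = true
        · rw [PySem.Chars.split₀.go, PySem.Chars.split₀.go]
          simp only [hs, h, if_true]
          exact ih [] acc
        · rw [PySem.Chars.split₀.go, PySem.Chars.split₀.go]
          simp only [hs, h, if_true, if_false, Bool.false_eq_true]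
          rw [ih [] (cur.reverse :: acc), ih [] [cur.reverse]]
          simp
      · rw [PySem.Chars.split₀.go, PySem.Chars.split₀.go]
        simp only [hs, if_false, Bool.false_eq_true]
        exact ih _ _

-- the central lemma: B's scanner computes A's fold over split₀'s tokens
lemma scan_eq_fold :
    ∀ (cs cur : List Char) (names : List String),
      esnScan cs names (cur.reverse.takeWhile esnP) (cur.contains '(')
        = (PySem.Chars.split₀.go cs cur []).foldl esnStep names := by
  intro cs
  induction cs with
  | nil =>
      intro cur names
      rw [esnScan, PySem.Chars.split₀.go]
      by_cases h : cur.isEmpty = true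
      · have hc : cur = [] := by simpa using h
        subst hc
        rfl
      · rw [if_neg h]
        simp only [List.reverse_cons, List.reverse_nil, List.nil_append,
          List.foldl_cons, List.foldl_nil]
        exact flush_eq names cur
  | cons c rest ih =>
      intro cur names
      rw [esnScan, PySem.Chars.split₀.go]
      by_cases hs : PySem.Chars.isspace c = true
      · rw [if_pos hs, if_pos hs]
        by_cases h : cur.isEmpty = true
        · have hc : cur = [] := by simpa using h
          subst hc
          have := ih [] names
          simpa using this
        · rw [if_neg h]
          rw [split0Go_acc rest [] [cur.reverse]]
          simp only [List.reverse_cons, List.reverse_nil, List.nil_append,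
            List.foldl_append, List.foldl_cons, List.foldl_nil]
          rw [flush_eq names cur]
          have := ih [] (esnStep names cur.reverse)
          simpa using this
      · rw [if_neg hs, if_neg hs]
        by_cases hc : c = '('
        · -- '(' starts/continues the skipped tail
          have hcont : (c :: cur).contains '(' = true := by simp [hc]
          have htw : ((c :: cur).reverse).takeWhile esnP = cur.reverse.takeWhile esnP := by
            by_cases hin : '(' ∈ cur
            · rw [List.reverse_cons]
              exact takeWhile_append_of_bad c ⟨'(', by simpa using hin, by simp [esnP]⟩
            · have hall : ∀ x ∈ cur.reverse, esnP x = true := by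
                intro x hxm
                have hxc : x ∈ cur := by simpa using hxm
                have : x ≠ '(' := fun hx => hin (hx ▸ hxc)
                simpa [esnP] using this
              have hts : cur.reverse.takeWhile esnP = cur.reverse :=
                List.takeWhile_eq_self_iff.mpr hall
              rw [List.reverse_cons, takeWhile_append_of_good c hall, hts,
                if_neg (by simp [esnP, hc]), List.append_nil]
          rw [if_pos hc]
          have := ih (c :: cur) names
          rw [htw, hcont] at this
          exact this
        · rw [if_neg hc]
          by_cases hsk : cur.contains '(' = true
          · -- inside the parenthesised tail: character dropped
            have hin : '(' ∈ cur := by simpa using hsk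
            have hcont : (c :: cur).contains '(' = true := by simp [hin]
            have htw : ((c :: cur).reverse).takeWhile esnP = cur.reverse.takeWhile esnP := by
              rw [List.reverse_cons]
              exact takeWhile_append_of_bad c ⟨'(', by simpa using hin, by simp [esnP]⟩
            rw [if_pos hsk]
            have := ih (c :: cur) names
            rw [htw, hcont] at this
            rw [hsk]
            exact this
          · -- ordinary character: appended to the current name
            have hin : '(' ∉ cur := by simpa using hsk
            have hskf : cur.contains '(' = false := by simpa using hsk
            have hcont : (c :: cur).contains '(' = false := by
              simp only [List.contains_cons, Bool.or_eq_false_iff, beq_eq_false_iff_ne]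
              exact ⟨Ne.symm hc, hskf⟩
            have hall : ∀ x ∈ cur.reverse, esnP x = true := by
              intro x hxm
              have hxc : x ∈ cur := by simpa using hxm
              have : x ≠ '(' := fun hx => hin (hx ▸ hxc)
              simpa [esnP] using this
            have htw : ((c :: cur).reverse).takeWhile esnP
                = cur.reverse.takeWhile esnP ++ [c] := by
              have hts : cur.reverse.takeWhile esnP = cur.reverse :=
                List.takeWhile_eq_self_iff.mpr hall
              have hpc : esnP c = true := by simpa [esnP] using hc
              rw [List.reverse_cons, takeWhile_append_of_good c hall, hts, if_pos hpc]
            rw [if_neg (by simpa using hsk)]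
            have := ih (c :: cur) names
            rw [htw, hcont] at this
            rw [hskf]
            exact this

-- ===== VERDICT (by name: the statement is the Claim_ definition above) =====
theorem extract_stage_names_spec : Claim_equal_extract_stage_names := by
  intro s _
  unfold Spec_extract_stage_names extract_stage_names extract_stage_names_alt
  by_cases h1 : PySem.Str.isIn "Stages:" s = true
  · by_cases h2 : PySem.Str.isIn "Hardware Status:" s = true
    · rw [if_pos (by rw [h1, h2]; rfl), if_neg (by rw [h1, h2]; simp)]
      exact (scan_eq_fold _ [] []).symm
    · have h2' : PySem.Str.isIn "Hardware Status:" s = false := by simpa using h2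
      rw [if_neg (by rw [h1, h2']; simp), if_pos (by rw [h1, h2']; rfl)]
  · have h1' : PySem.Str.isIn "Stages:" s = false := by simpa using h1
    rw [if_neg (by rw [h1']; simp), if_pos (by rw [h1']; rfl)]
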